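-- pv_equiv track=rewrite | github.com/adkonk/sequence-analysis | pirdisorderwindow.py | valueintervalfinder
-- ===== SOURCE A (Python) =====
-- def valueintervalfinder(scores, threshold):
--     i = 0
--     output = []
--     while i < len(scores):
--         searchforfirstchar = True
--         searchforlastchar = True
--         while searchforfirstchar:
--             if scores[i] <= threshold:
--                 searchforfirstchar = False
--                 firstcharposition = i
--                 while searchforlastchar and i < len(scores):
--                     if scores[i] > threshold:
--                         searchforlastchar = False
--                         lastcharposition = i
--                         output.append((firstcharposition, lastcharposition))
--                     elif i == len(scores) - 1:
--                         lastcharposition = i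
--                         output.append((firstcharposition, lastcharposition))
--                         i += 1
--                     else:
--                         i += 1
--             elif i == len(scores) - 1:
--                 searchforfirstchar = False
--                 i += 1
--             else:
--                 i += 1
--     return output
-- ===== SOURCE B (Python) =====
-- def valueintervalfinder(scores, threshold):
--     out = []
--     start = None
--     for i, v in enumerate(scores):
--         if v <= threshold:
--             if start is None:
--                 start = i
--         elif start is not None:
--             out.append((start, i))
--             start = None
--     if start is not None:
--         out.append((start, len(scores) - 1))
--     return out
-- ===== Notes on version B (the rewrite author's own statement) =====
-- stated objective: simpler
-- what changed: Replaced A's three nested while-loops with flag variables by a single enumerate pass that carries an optional run-start index and closes an interval at each breaker (or with len-1 at the end of the list).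
import Mathlib
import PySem

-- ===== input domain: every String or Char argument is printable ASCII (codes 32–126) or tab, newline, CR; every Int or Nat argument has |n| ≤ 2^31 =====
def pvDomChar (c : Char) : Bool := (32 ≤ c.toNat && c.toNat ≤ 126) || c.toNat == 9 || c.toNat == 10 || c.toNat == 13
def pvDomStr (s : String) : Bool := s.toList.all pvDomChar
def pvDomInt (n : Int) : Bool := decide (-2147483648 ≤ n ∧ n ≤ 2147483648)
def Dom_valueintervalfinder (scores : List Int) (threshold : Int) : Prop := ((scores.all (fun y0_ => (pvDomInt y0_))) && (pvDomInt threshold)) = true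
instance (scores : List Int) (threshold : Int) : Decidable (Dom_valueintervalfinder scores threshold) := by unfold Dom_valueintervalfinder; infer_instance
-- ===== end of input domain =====

-- B replaces A's three nested while-loops with flag variables by a single pass over
-- enumerate(scores) carrying an optional run-start index (objective: simpler).

-- ===== PORT A =====
-- inner 'while searchforlastchar and i < len(scores)' loop, returning (output, i) as left
-- after the loop; the fuel argument is only a totality guard (the supplied fuel is never
-- exhausted: i grows strictly below len(scores) on every recursive call)
def pvInnerA (scores : List Int) (threshold : Int) (first : Nat) :
    Nat → Nat → List (Int × Int) → List (Int × Int) × Nat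
  | 0, i, out => (out, i)
  | fuel + 1, i, out =>
    if h : i < scores.length then
      if scores[i] > threshold then (out ++ [((first : Int), (i : Int))], i)
      else if i = scores.length - 1 then (out ++ [((first : Int), (i : Int))], i + 1)
      else pvInnerA scores threshold first fuel (i + 1) out
    else (out, i)

-- outer 'while i < len(scores)' loop together with the 'while searchforfirstchar' scan
-- (same fuel guard; both 'i += 1' arms of the scan re-enter the loop identically)
def pvOuterA (scores : List Int) (threshold : Int) :
    Nat → Nat → List (Int × Int) → List (Int × Int)
  | 0, _, out => out
  | fuel + 1, i, out =>
    if h : i < scores.length then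
      if scores[i] ≤ threshold then
        let r := pvInnerA scores threshold i (scores.length + 1) i out
        pvOuterA scores threshold fuel r.2 r.1
      else if i = scores.length - 1 then pvOuterA scores threshold fuel (i + 1) out
      else pvOuterA scores threshold fuel (i + 1) out
    else out

def valueintervalfinder (scores : List Int) (threshold : Int) : List (Int × Int) :=
  pvOuterA scores threshold (scores.length + 1) 0 []

-- ===== PORT B =====
def pvStepB (threshold : Int) (acc : List (Int × Int) × Option Int)
    (p : Int × Int) : List (Int × Int) × Option Int :=
  if p.2 ≤ threshold then
    match acc.2 with
    | none => (acc.1, some p.1)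
    | some s => (acc.1, some s)
  else
    match acc.2 with
    | none => acc
    | some s => (acc.1 ++ [(s, p.1)], none)

def valueintervalfinder_alt (scores : List Int) (threshold : Int) : List (Int × Int) :=
  let r := (PySem.List.enumerate scores 0).foldl (pvStepB threshold) ([], none)
  match r.2 with
  | some s => r.1 ++ [(s, (scores.length : Int) - 1)]
  | none => r.1

-- ===== PRECONDITION & SPEC =====
def Spec_valueintervalfinder (scores : List Int) (threshold : Int) (out : List (Int × Int)) : Prop := out = valueintervalfinder_alt scores threshold
instance (scores : List Int) (threshold : Int) (out : List (Int × Int)) : Decidable (Spec_valueintervalfinder scores threshold out) := by unfold Spec_valueintervalfinder; infer_instance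

-- ===== CLAIM (what is proved, stated in full; the proofs are below) =====
def Claim_equal_valueintervalfinder : Prop := ∀ (scores : List Int) (threshold : Int), Dom_valueintervalfinder scores threshold → Spec_valueintervalfinder scores threshold (valueintervalfinder scores threshold)

-- ===== LEMMAS AND PROOFS =====

-- reference function: scan from index i with pending run start st
def pvG (scores : List Int) (threshold : Int) (i : Nat) (st : Option Int) : List (Int × Int) :=
  if h : i < scores.length then
    if scores[i] ≤ threshold then pvG scores threshold (i + 1) (some (st.getD (i : Int)))
    else
      match st with
      | none => pvG scores threshold (i + 1) none
      | some a => (a, (i : Int)) :: pvG scores threshold (i + 1) none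
  else
    match st with
    | none => []
    | some a => [(a, (scores.length : Int) - 1)]
termination_by scores.length - i

theorem pvG_none_nil (scores : List Int) (threshold : Int) (i : Nat)
    (h : scores.length ≤ i) : pvG scores threshold i none = [] := by
  rw [pvG, dif_neg (by omega)]

theorem pvA_main (scores : List Int) (threshold : Int) :
    ∀ n i, scores.length - i ≤ n →
      (∀ out fuel, scores.length ≤ i + fuel →
        pvOuterA scores threshold fuel i out = out ++ pvG scores threshold i none) ∧
      (∀ f out fuelO fuelI (h : i < scores.length),
          (threshold < scores[i] → scores.length ≤ i + fuelO) →
          (scores[i] ≤ threshold → scores.length ≤ i + 1 + fuelO) →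
          scores.length ≤ i + fuelI →
        pvOuterA scores threshold fuelO (pvInnerA scores threshold f fuelI i out).2
            (pvInnerA scores threshold f fuelI i out).1
          = out ++ pvG scores threshold i (some (f : Int))) := by
  intro n
  induction n with
  | zero =>
    intro i hn
    constructor
    · intro out fuel hf
      cases fuel with
      | zero => rw [pvOuterA, pvG_none_nil scores threshold i (by omega)]; simp
      | succ c => rw [pvOuterA, dif_neg (by omega), pvG_none_nil scores threshold i (by omega)]; simp
    · intro f out fuelO fuelI h hO1 hO2 hI
      exact absurd h (by omega)
  | succ m ih =>
    intro i hn
    by_cases h : i < scores.length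
    · have hpart2 : ∀ f out fuelO fuelI,
          (threshold < scores[i] → scores.length ≤ i + fuelO) →
          (scores[i] ≤ threshold → scores.length ≤ i + 1 + fuelO) →
          scores.length ≤ i + fuelI →
          pvOuterA scores threshold fuelO (pvInnerA scores threshold f fuelI i out).2
              (pvInnerA scores threshold f fuelI i out).1
            = out ++ pvG scores threshold i (some (f : Int)) := by
        intro f out fuelO fuelI hO1 hO2 hI
        cases fuelI with
        | zero => exact absurd h (by omega)
        | succ k =>
          by_cases hle : scores[i] ≤ threshold
          · rw [pvInnerA, dif_pos h, if_neg (by omega)]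
            by_cases hlast : i = scores.length - 1
            · rw [if_pos hlast]
              have hlen : i + 1 = scores.length := by omega
              have hout : pvOuterA scores threshold fuelO (i + 1) (out ++ [((f : Int), (i : Int))])
                  = out ++ [((f : Int), (i : Int))] := by
                cases fuelO with
                | zero => rw [pvOuterA]
                | succ c => rw [pvOuterA, dif_neg (by omega)]
              rw [hout, pvG, dif_pos h, if_pos hle, pvG, dif_neg (by omega)]
              have hc : ((scores.length : Int) - 1) = (i : Int) := by omega
              simp [hc]
            · rw [if_neg hlast]
              have hnext := hO2 hle
              have h2 := (ih (i + 1) (by omega)).2 f out fuelO k (by omega)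
                (fun _ => by omega) (fun _ => by omega) (by omega)
              rw [pvG, dif_pos h, if_pos hle]
              simpa using h2
          · have hbrk := hO1 (by omega)
            rw [pvInnerA, dif_pos h, if_pos (by omega)]
            rw [pvG, dif_pos h, if_neg hle]
            cases fuelO with
            | zero => exact absurd h (by omega)
            | succ c =>
              rw [pvOuterA, dif_pos h, if_neg hle]
              have h1 := (ih (i + 1) (by omega)).1 (out ++ [((f : Int), (i : Int))]) c (by omega)
              split
              · simpa [List.append_assoc] using h1
              · simpa [List.append_assoc] using h1
      constructor
      · intro out fuel hf
        cases fuel with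
        | zero => exact absurd h (by omega)
        | succ c =>
          rw [pvOuterA, dif_pos h]
          by_cases hle : scores[i] ≤ threshold
          · rw [if_pos hle]
            have h2 := hpart2 i out c (scores.length + 1)
              (fun hgt => absurd hle (by omega)) (fun _ => by omega) (by omega)
            rw [pvG, dif_pos h, if_pos hle]
            rw [pvG, dif_pos h, if_pos hle] at h2
            simpa using h2
          · rw [if_neg hle]
            rw [pvG, dif_pos h, if_neg hle]
            have h1 := (ih (i + 1) (by omega)).1 out c (by omega)
            split
            · exact h1
            · exact h1
      · intro f out fuelO fuelI _ hO1 hO2 hI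
        exact hpart2 f out fuelO fuelI hO1 hO2 hI
    · constructor
      · intro out fuel hf
        cases fuel with
        | zero => rw [pvOuterA, pvG_none_nil scores threshold i (by omega)]; simp
        | succ c => rw [pvOuterA, dif_neg h, pvG_none_nil scores threshold i (by omega)]; simp
      · intro f out fuelO fuelI h' hO1 hO2 hI
        exact absurd h' h

theorem pvB_main (scores : List Int) (threshold : Int) :
    ∀ n i, scores.length - i ≤ n → ∀ out st,
      (match ((PySem.List.enumerate (scores.drop i) (i : Int)).foldl (pvStepB threshold) (out, st)) with
        | (l, some s) => l ++ [(s, (scores.length : Int) - 1)]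
        | (l, none) => l)
        = out ++ pvG scores threshold i st := by
  intro n
  induction n with
  | zero =>
    intro i hn out st
    rw [List.drop_eq_nil_of_le (by omega), pvG.eq_def, dif_neg (by omega)]
    simp [PySem.List.enumerate]
    cases st <;> simp
  | succ m ih =>
    intro i hn out st
    by_cases h : i < scores.length
    · have hdrop : scores.drop i = scores[i] :: scores.drop (i + 1) :=
        (List.getElem_cons_drop h).symm
      rw [hdrop, PySem.List.enumerate_cons, List.foldl_cons]
      rw [pvG.eq_def, dif_pos h]
      have hcast : ((i : Int) + 1) = ((i + 1 : Nat) : Int) := by push_cast; ring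
      by_cases hle : scores[i] ≤ threshold
      · rw [if_pos hle]
        cases st with
        | none =>
          simp only [pvStepB, hle, if_pos, Option.getD]
          rw [hcast]
          simpa using ih (i + 1) (by omega) out (some (i : Int))
        | some a =>
          simp only [pvStepB, hle, if_pos, Option.getD]
          rw [hcast]
          simpa using ih (i + 1) (by omega) out (some a)
      · rw [if_neg hle]
        cases st with
        | none =>
          simp only [pvStepB, hle]
          rw [hcast]
          simpa using ih (i + 1) (by omega) out none
        | some a =>
          simp only [pvStepB, hle]
          rw [hcast]
          have := ih (i + 1) (by omega) (out ++ [(a, (i : Int))]) none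
          simpa [List.append_assoc] using this
    · rw [List.drop_eq_nil_of_le (by omega), pvG.eq_def, dif_neg h]
      simp [PySem.List.enumerate]
      cases st <;> simp

-- ===== VERDICT (by name: the statement is the Claim_ definition above) =====
theorem valueintervalfinder_spec : Claim_equal_valueintervalfinder := by
  intro scores threshold _
  unfold Spec_valueintervalfinder valueintervalfinder valueintervalfinder_alt
  have hA := (pvA_main scores threshold scores.length 0 (by omega)).1 [] (scores.length + 1) (by omega)
  have hB := pvB_main scores threshold scores.length 0 (by omega) [] none
  simp only [List.drop_zero] at hB
  simp only [Nat.cast_zero] at hB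
  rw [hA]
  rw [← hB]
  rcases hfold : (PySem.List.enumerate scores 0).foldl (pvStepB threshold) ([], none) with ⟨l, st⟩
  cases st <;> rfl
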